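-- pv_equiv track=rewrite | github.com/trox667/aoc | 2020/python/day10.py | next_in_range
-- ===== SOURCE A (Python) =====
-- def next_in_range(joltages, joltage, range=3):
--     r = list()
--     for j in joltages:
--         if j <= joltage+3 or j-1 <= joltage+3 or j-2 <= joltage+3 or j-3 <= joltage+3:
--             r.append(j)
--     if len(r) == 0:
--         return (None, None, None)
--     joltages.remove(min(r))
--     return (joltages, min(r), min(r)-joltage)
-- ===== SOURCE B (Python) =====
-- def next_in_range(joltages, joltage, range=3):
--     if not joltages:
--         return (None, None, None)
--     m = min(joltages)
--     if m > joltage + 6: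
--         return (None, None, None)
--     joltages.remove(m)
--     return (joltages, m, m - joltage)
-- ===== Notes on version B (the rewrite author's own statement) =====
-- stated objective: simpler
-- what changed: A's filter-build pass plus three separate min() scans of the filtered list are replaced by one min over the whole list and a threshold test (the redundant 4-way disjunction collapses to m <= joltage+6, and the filtered minimum equals the global minimum whenever any element qualifies).
import Mathlib
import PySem

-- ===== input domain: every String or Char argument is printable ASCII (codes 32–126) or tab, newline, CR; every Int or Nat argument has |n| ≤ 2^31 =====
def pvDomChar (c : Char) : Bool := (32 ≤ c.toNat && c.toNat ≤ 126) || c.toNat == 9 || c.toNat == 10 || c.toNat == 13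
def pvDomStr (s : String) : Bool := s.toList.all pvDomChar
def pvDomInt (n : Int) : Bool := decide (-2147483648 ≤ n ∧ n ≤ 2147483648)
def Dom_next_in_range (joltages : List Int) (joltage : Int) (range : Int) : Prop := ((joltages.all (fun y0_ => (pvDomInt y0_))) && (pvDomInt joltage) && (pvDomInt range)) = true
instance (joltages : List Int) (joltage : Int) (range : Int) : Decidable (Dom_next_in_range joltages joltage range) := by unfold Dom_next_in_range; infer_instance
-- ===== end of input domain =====

-- ===== PORT A =====
-- B replaces A's filter pass + three min scans by one global min and a threshold test; the
-- in-place joltages.remove mutation is the same in both (the proved equivalence is about the return value).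
def next_in_range (joltages : List Int) (joltage : Int) (range : Int) : Option (List Int) × Option Int × Option Int :=
  let r := joltages.foldl (fun acc j =>
    if j ≤ joltage + 3 ∨ j - 1 ≤ joltage + 3 ∨ j - 2 ≤ joltage + 3 ∨ j - 3 ≤ joltage + 3
    then acc ++ [j] else acc) []
  if r.length = 0 then (none, none, none)
  else
    match PySem.List.min? r (fun x => x) with
    | none => (none, none, none)  -- unreachable: r is nonempty here
    | some m => (PySem.List.remove? joltages m, some m, some (m - joltage))

-- ===== PORT B =====
def next_in_range_alt (joltages : List Int) (joltage : Int) (range : Int) : Option (List Int) × Option Int × Option Int :=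
  match PySem.List.min? joltages (fun x => x) with
  | none => (none, none, none)  -- joltages is empty
  | some m =>
    if joltage + 6 < m then (none, none, none)
    else (PySem.List.remove? joltages m, some m, some (m - joltage))

-- ===== PRECONDITION & SPEC =====
def Spec_next_in_range (joltages : List Int) (joltage : Int) (range : Int) (out : Option (List Int) × Option Int × Option Int) : Prop := out = next_in_range_alt joltages joltage range
instance (joltages : List Int) (joltage : Int) (range : Int) (out : Option (List Int) × Option Int × Option Int) : Decidable (Spec_next_in_range joltages joltage range out) := by unfold Spec_next_in_range; infer_instance

-- ===== CLAIM (what is proved, stated in full; the proofs are below) =====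
def Claim_equal_next_in_range : Prop := ∀ (joltages : List Int) (joltage : Int) (range : Int), Dom_next_in_range joltages joltage range → Spec_next_in_range joltages joltage range (next_in_range joltages joltage range)

-- ===== LEMMAS AND PROOFS =====
-- A's 4-way disjunction is equivalent to j ≤ joltage + 6
theorem filter_cond_eq (joltage : Int) (xs : List Int) :
    xs.filter (fun j => decide (j ≤ joltage + 3 ∨ j - 1 ≤ joltage + 3 ∨ j - 2 ≤ joltage + 3 ∨ j - 3 ≤ joltage + 3))
      = xs.filter (fun j => decide (j ≤ joltage + 6)) := by
  apply List.filter_congr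
  intro x _
  simp only [decide_eq_decide]
  omega

-- ===== VERDICT (by name: the statement is the Claim_ definition above) =====
theorem next_in_range_spec : Claim_equal_next_in_range := by
  intro joltages joltage range _
  unfold Spec_next_in_range next_in_range next_in_range_alt
  rw [PySem.List.foldl_append_ite_eq_filter]
  rw [filter_cond_eq joltage joltages]
  cases hmin : PySem.List.min? joltages (fun x => x) with
  | none =>
    have : joltages = [] := (PySem.List.min?_eq_none_iff _ _).mp hmin
    subst this; simp
  | some n =>
    have hnmem : n ∈ joltages := PySem.List.min?_mem hmin
    have hnmin : ∀ y ∈ joltages, n ≤ y := by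
      intro y hy; exact PySem.List.min?_isMin hmin y hy
    by_cases hbig : joltage + 6 < n
    · have hfe : joltages.filter (fun j => decide (j ≤ joltage + 6)) = [] := by
        rw [List.filter_eq_nil_iff]
        intro a ha
        simp only [decide_eq_true_eq]
        have := hnmin a ha; omega
      simp [hfe, hbig]
    · rw [not_lt] at hbig
      have hnf : n ∈ joltages.filter (fun j => decide (j ≤ joltage + 6)) := by
        simp [List.mem_filter, hnmem, hbig]
      have hne : joltages.filter (fun j => decide (j ≤ joltage + 6)) ≠ [] := by
        intro h; rw [h] at hnf; exact absurd hnf (List.not_mem_nil)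
      cases hmf : PySem.List.min? (joltages.filter (fun j => decide (j ≤ joltage + 6))) (fun x => x) with
      | none => exact absurd ((PySem.List.min?_eq_none_iff _ _).mp hmf) hne
      | some m =>
        have hm_eq : m = n := by
          have h1 : m ∈ joltages.filter (fun j => decide (j ≤ joltage + 6)) := PySem.List.min?_mem hmf
          have h2 : m ∈ joltages := (List.mem_filter.mp h1).1
          have h3 : m ≤ n := PySem.List.min?_isMin hmf n hnf
          have h4 : n ≤ m := hnmin m h2
          omega
        subst hm_eq
        simp [List.length_eq_zero_iff, hne, hmf, if_neg (not_lt.mpr hbig)]
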